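-- pv_equiv track=rewrite | github.com/jfisteus/eyegrade | eyegrade/create/latex.py | table_geometry
-- ===== SOURCE A (Python) =====
-- def table_geometry(dimensions):
--     num_cols = [table[0] for table in dimensions]
--     num_rows = 2 + max([table[1] for table in dimensions])
--     tables = []
--     for i in range(0, num_rows):
--         row = []
--         for j, num_choices in enumerate(num_cols):
--             if i < dimensions[j][1]:
--                 row.append(num_choices)
--             elif i == dimensions[j][1]:
--                 row.append(-1)
--             elif i == dimensions[j][1] + 1:
--                 row.append(-2)
--             else:
--                 row.append(0)
--         tables.append(row)
--     question_numbers = [1]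
--     for i in range(0, len(dimensions) - 1):
--         question_numbers.append(question_numbers[-1] + dimensions[i][1])
--     return tables, question_numbers
-- ===== SOURCE B (Python) =====
-- def table_geometry(dimensions):
--     num_rows = 2 + max(d for _, d in dimensions)
--     rows = [[] for _ in range(num_rows)]
--     for choices, d in dimensions:
--         column = [choices] * d + [-1, -2] + [0] * (num_rows - d - 2)
--         rows = [row + [cell] for row, cell in zip(rows, column)]
--     question_numbers = [1 + sum(d for _, d in dimensions[:k])
--                         for k in range(len(dimensions))]
--     return rows, question_numbers
-- ===== Notes on version B (the rewrite author's own statement) =====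
-- stated objective: alternative
-- what changed: B replaces A's row-major double loop with its per-cell 4-way branch by branch-free run-length columns ([choices]*d + [-1,-2] + [0]*pad) folded into the rows with an elementwise zip-append, and computes question numbers as closed-form prefix sums over list slices (quadratic in the number of tables) instead of A's loop that re-reads the output list's last element.
-- outside the precondition, e.g. on table_geometry([]): A raises ValueError, B raises ValueError; on table_geometry([(3, -1)]): A returns ([[-2]], [1]), B returns ([[-1]], [1])
import Mathlib
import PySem

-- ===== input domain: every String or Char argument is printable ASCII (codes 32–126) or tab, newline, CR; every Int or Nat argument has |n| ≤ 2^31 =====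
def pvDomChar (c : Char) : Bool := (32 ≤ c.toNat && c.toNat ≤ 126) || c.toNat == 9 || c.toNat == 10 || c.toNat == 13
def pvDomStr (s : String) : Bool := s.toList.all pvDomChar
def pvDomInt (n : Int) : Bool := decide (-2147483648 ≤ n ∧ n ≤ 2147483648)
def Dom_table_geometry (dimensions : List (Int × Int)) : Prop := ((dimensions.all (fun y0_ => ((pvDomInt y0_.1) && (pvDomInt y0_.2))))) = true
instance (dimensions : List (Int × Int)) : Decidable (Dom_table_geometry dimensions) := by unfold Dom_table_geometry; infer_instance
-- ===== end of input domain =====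

-- B builds each table's column as branch-free constant runs ([choices]*d + [-1,-2] + [0]*pad)
-- folded into the rows by elementwise zip-append, and gets question numbers as closed-form
-- prefix sums over slices, instead of A's row-major double loop with a per-cell 4-way branch
-- and a loop re-reading the output's last element; alternative decomposition, same cost.

-- ===== PORT A =====
def table_geometry (dimensions : List (Int × Int)) : List (List Int) × List Int :=
  let num_cols := dimensions.map (fun table => table.1)
  let num_rows : Int := 2 + (PySem.List.max? (dimensions.map (fun table => table.2)) (fun x => x)).getD 0
  let tables := (PySem.List.pyRange 0 num_rows 1).foldl (fun tables i =>
    let row := (PySem.List.enumerate num_cols).foldl (fun row jc =>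
      if i < (PySem.List.pyGetD dimensions jc.1 (0, 0)).2 then row ++ [jc.2]
      else if i = (PySem.List.pyGetD dimensions jc.1 (0, 0)).2 then row ++ [-1]
      else if i = (PySem.List.pyGetD dimensions jc.1 (0, 0)).2 + 1 then row ++ [-2]
      else row ++ [0]) []
    tables ++ [row]) []
  let question_numbers := (PySem.List.pyRange 0 ((dimensions.length : Int) - 1) 1).foldl
    (fun qn i => qn ++ [PySem.List.pyGetD qn (-1) 0 + (PySem.List.pyGetD dimensions i (0, 0)).2]) [1]
  (tables, question_numbers)

-- ===== PORT B =====
def table_geometry_alt (dimensions : List (Int × Int)) : List (List Int) × List Int :=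
  let num_rows : Int := 2 + (PySem.List.max? (dimensions.map (fun table => table.2)) (fun x => x)).getD 0
  let rows0 : List (List Int) := (PySem.List.pyRange 0 num_rows 1).map (fun _ => ([] : List Int))
  let rows := dimensions.foldl (fun rows t =>
    let column := PySem.List.pyRepeat [t.1] t.2 ++ [-1, -2] ++ PySem.List.pyRepeat [(0 : Int)] (num_rows - t.2 - 2)
    (rows.zip column).map (fun rc => rc.1 ++ [rc.2])) rows0
  let question_numbers := (PySem.List.pyRange 0 (PySem.List.len dimensions) 1).map
    (fun k => 1 + ((PySem.List.slice dimensions none (some k)).map (fun t => t.2)).sum)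
  (rows, question_numbers)

-- ===== PRECONDITION & SPEC =====
-- Pre_ excludes the empty list, on which A raises ValueError at max([]), and lists containing a
-- negative row-count d — a nonsense dimension outside the task's natural domain, where A's
-- branches fabricate a cell while B's run-length column is naturally truncated.
def Pre_table_geometry (dimensions : List (Int × Int)) : Prop :=
  dimensions ≠ [] ∧ ∀ t ∈ dimensions, 0 ≤ t.2
instance (dimensions : List (Int × Int)) : Decidable (Pre_table_geometry dimensions) := by
  unfold Pre_table_geometry; infer_instance
def pvWitness_table_geometry : (List (Int × Int)) := [(3, 2), (4, 1)]
def Spec_table_geometry (dimensions : List (Int × Int)) (out : List (List Int) × List Int) : Prop := out = table_geometry_alt dimensions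
instance (dimensions : List (Int × Int)) (out : List (List Int) × List Int) : Decidable (Spec_table_geometry dimensions out) := by unfold Spec_table_geometry; infer_instance

-- ===== CLAIM (what is proved, stated in full; the proofs are below) =====
def Claim_equal_table_geometry : Prop := ∀ (dimensions : List (Int × Int)), Dom_table_geometry dimensions → Pre_table_geometry dimensions → Spec_table_geometry dimensions (table_geometry dimensions)

-- ===== LEMMAS AND PROOFS =====

-- the value A's branches put in row i of a table with `choices` options and d answer rows
def tg_cell (i choices d : Int) : Int :=
  if i < d then choices else if i = d then -1 else if i = d + 1 then -2 else 0

-- A's inner row loop produces the same row as mapping tg_cell over the tables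
theorem tg_A_row (dims : List (Int × Int)) (i : Int) :
    ((PySem.List.enumerate (dims.map (fun t => t.1))).foldl (fun row jc =>
      if i < (PySem.List.pyGetD dims jc.1 (0, 0)).2 then row ++ [jc.2]
      else if i = (PySem.List.pyGetD dims jc.1 (0, 0)).2 then row ++ [-1]
      else if i = (PySem.List.pyGetD dims jc.1 (0, 0)).2 + 1 then row ++ [-2]
      else row ++ [0]) [])
    = dims.map (fun t => tg_cell i t.1 t.2) := by
  have hstep : (fun (row : List Int) (jc : Int × Int) =>
      if i < (PySem.List.pyGetD dims jc.1 (0, 0)).2 then row ++ [jc.2]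
      else if i = (PySem.List.pyGetD dims jc.1 (0, 0)).2 then row ++ [-1]
      else if i = (PySem.List.pyGetD dims jc.1 (0, 0)).2 + 1 then row ++ [-2]
      else row ++ [0])
      = (fun row jc => row ++ [tg_cell i jc.2 (PySem.List.pyGetD dims jc.1 (0, 0)).2]) := by
    funext row jc
    unfold tg_cell
    split_ifs <;> rfl
  rw [hstep, PySem.List.foldl_append_singleton_eq_map, List.nil_append,
    PySem.List.enumerate_eq_map_pyRange (dims.map (fun t => t.1)) 0, List.map_map]
  have hlen : PySem.List.len (dims.map (fun t => t.1)) = PySem.List.len dims := by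
    simp [PySem.List.len]
  rw [hlen]
  have hcomp : ((fun jc : Int × Int => tg_cell i jc.2 (PySem.List.pyGetD dims jc.1 (0, 0)).2)
        ∘ (fun j => (j, PySem.List.pyGetD (dims.map (fun t => t.1)) j 0)))
      = ((fun t : Int × Int => tg_cell i t.1 t.2) ∘ (fun j => PySem.List.pyGetD dims j (0, 0))) := by
    funext j
    have h1 : PySem.List.pyGetD (dims.map (fun t => t.1)) j 0
        = (PySem.List.pyGetD dims j (0, 0)).1 :=
      PySem.List.pyGetD_map (fun t : Int × Int => t.1) dims j (0, 0)
    simp only [Function.comp_apply, h1]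
  rw [hcomp, ← List.map_map, PySem.List.map_pyGetD_pyRange_zero]

-- B's run-length column is exactly tg_cell mapped over the row indices
theorem tg_column_eq (c d R : Int) (hd : 0 ≤ d) (hdR : d + 2 ≤ R) :
    PySem.List.pyRepeat [c] d ++ [-1, -2] ++ PySem.List.pyRepeat [(0 : Int)] (R - d - 2)
      = (PySem.List.pyRange 0 R 1).map (fun i => tg_cell i c d) := by
  rw [PySem.List.pyRange_one_append 0 (d + 2) R (by omega) hdR,
    PySem.List.pyRange_one_append 0 d (d + 2) hd (by omega),
    List.map_append, List.map_append]
  refine congrArg₂ (· ++ ·) (congrArg₂ (· ++ ·) ?_ ?_) ?_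
  · rw [PySem.List.pyRepeat_singleton]
    symm
    refine List.eq_replicate_iff.mpr ⟨by simp [PySem.List.length_pyRange_one], ?_⟩
    intro x hx
    simp only [List.mem_map] at hx
    obtain ⟨i, hi, rfl⟩ := hx
    rw [PySem.List.mem_pyRange_one] at hi
    simp [tg_cell, hi.2]
  · rw [show d + 2 = (d + 1) + 1 from by ring,
      PySem.List.pyRange_one_succ_right (by omega),
      PySem.List.pyRange_one_singleton]
    simp [tg_cell]
  · rw [PySem.List.pyRepeat_singleton]
    symm
    refine List.eq_replicate_iff.mpr ⟨by simp [PySem.List.length_pyRange_one]; omega, ?_⟩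
    intro x hx
    simp only [List.mem_map] at hx
    obtain ⟨i, hi, rfl⟩ := hx
    rw [PySem.List.mem_pyRange_one] at hi
    have h1 : ¬ i < d := by omega
    have h2 : ¬ i = d := by omega
    have h3 : ¬ i = d + 1 := by omega
    simp [tg_cell, h1, h2, h3]

-- folding zip-append of per-element columns over mapped rows appends each element's cell
theorem tg_foldl_zip_snoc {α : Type} (L : List α) (R : List Int) (g : α → Int → Int) :
    ∀ (h : Int → List Int),
      L.foldl (fun rows a => ((rows.zip (R.map (g a))).map (fun rc => rc.1 ++ [rc.2])))
        (R.map h)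
      = R.map (fun i => h i ++ L.map (fun a => g a i)) := by
  induction L with
  | nil => intro h; simp
  | cons a L ih =>
    intro h
    simp only [List.foldl_cons]
    rw [List.zip_map', List.map_map]
    have : (R.map ((fun rc : List Int × Int => rc.1 ++ [rc.2]) ∘ fun i => (h i, g a i)))
        = R.map (fun i => h i ++ [g a i]) := by simp [Function.comp]
    rw [this, ih (fun i => h i ++ [g a i])]
    refine List.map_congr_left (fun i _ => ?_)
    simp

-- the partial sums appended by A's question-number loop
def tg_qsums : List Int → Int → List Int
  | [], _ => []
  | d :: ds, t => (t + d) :: tg_qsums ds (t + d)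

-- A's question-number loop over a list suffix, characterised
theorem tg_A_qn (ds : List (Int × Int)) :
    ∀ (qn : List Int) (x : Int),
      (ds.foldl (fun qn t => qn ++ [PySem.List.pyGetD qn (-1) 0 + t.2]) (qn ++ [x]))
        = qn ++ [x] ++ tg_qsums (ds.map Prod.snd) x := by
  induction ds with
  | nil => intro qn x; simp [tg_qsums]
  | cons d ds ih =>
    intro qn x
    simp only [List.foldl_cons, PySem.List.pyGetD_neg_one_append_singleton]
    have := ih (qn ++ [x]) (x + d.2)
    simpa [tg_qsums, List.append_assoc] using this

-- the running-total list is the list of closed-form prefix sums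
theorem tg_qsums_map (ds : List Int) :
    ∀ t, t :: tg_qsums ds t
      = (List.range (ds.length + 1)).map (fun k => t + (ds.take k).sum) := by
  induction ds with
  | nil => intro t; simp [tg_qsums]
  | cons d ds ih =>
    intro t
    rw [show (d :: ds).length + 1 = ((ds.length + 1) + 1) from by simp,
      List.range_succ_eq_map, List.map_cons, List.map_map]
    have h0 : t + ((d :: ds).take 0).sum = t := by simp
    rw [h0]
    refine congrArg₂ _ rfl ?_
    have hc : ((fun k => t + ((d :: ds).take k).sum) ∘ Nat.succ)
        = (fun k => (t + d) + (ds.take k).sum) := by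
      funext k
      simp [Function.comp, List.take_succ_cons]
      ring
    rw [hc, ← ih (t + d)]
    simp [tg_qsums]

-- ===== VERDICT (by name: the statement is the Claim_ definition above) =====
theorem table_geometry_spec : Claim_equal_table_geometry := by
  intro dims _ hpre
  obtain ⟨hne, hnn⟩ := hpre
  unfold Spec_table_geometry
  simp only [table_geometry, table_geometry_alt]
  -- the shared number of rows, and the bound every d satisfies
  set R : Int := 2 + (PySem.List.max? (dims.map (fun table => table.2)) (fun x => x)).getD 0 with hR
  have hbound : ∀ t ∈ dims, t.2 + 2 ≤ R := by
    intro t ht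
    rcases hm : PySem.List.max? (dims.map (fun table => table.2)) (fun x => x) with _ | m
    · exact absurd ((PySem.List.max?_eq_none_iff _ _).mp hm) (by simpa using hne)
    · have := PySem.List.max?_isMax hm t.2 (List.mem_map_of_mem ht)
      simp only [hR, hm, Option.getD_some]
      omega
  refine Prod.ext ?_ ?_
  · -- the tables grid
    rw [PySem.List.foldl_append_singleton_eq_map
      (fun i => (PySem.List.enumerate (dims.map (fun t => t.1))).foldl _ []), List.nil_append]
    have hcols : dims.foldl (fun rows t =>
        ((rows.zip (PySem.List.pyRepeat [t.1] t.2 ++ [-1, -2]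
          ++ PySem.List.pyRepeat [(0 : Int)] (R - t.2 - 2))).map (fun rc => rc.1 ++ [rc.2])))
        ((PySem.List.pyRange 0 R 1).map (fun _ => ([] : List Int)))
        = dims.foldl (fun rows t =>
        ((rows.zip ((PySem.List.pyRange 0 R 1).map (fun i => tg_cell i t.1 t.2))).map
          (fun rc => rc.1 ++ [rc.2])))
        ((PySem.List.pyRange 0 R 1).map (fun _ => ([] : List Int))) := by
      refine PySem.List.foldl_congr_mem _ _ _ _ ?_
      intro acc t ht
      rw [tg_column_eq t.1 t.2 R (hnn t ht) (hbound t ht)]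
    rw [hcols, tg_foldl_zip_snoc dims (PySem.List.pyRange 0 R 1)
      (fun t i => tg_cell i t.1 t.2) (fun _ => ([] : List Int))]
    symm
    refine List.map_congr_left (fun i _ => ?_)
    rw [tg_A_row dims i]
    simp
  · -- the question numbers
    have hcongr : (PySem.List.pyRange 0 ((dims.length : Int) - 1) 1).foldl
        (fun qn i => qn ++ [PySem.List.pyGetD qn (-1) 0 + (PySem.List.pyGetD dims i (0, 0)).2]) [1]
        = (PySem.List.pyRange 0 ((dims.length : Int) - 1) 1).foldl
        (fun qn i => qn ++ [PySem.List.pyGetD qn (-1) 0 + (PySem.List.pyGetD dims.dropLast i (0, 0)).2]) [1] := by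
      refine PySem.List.foldl_congr_mem _ _ _ _ ?_
      intro acc x hx
      rw [PySem.List.mem_pyRange_one] at hx
      have hxlt : x < (dims.dropLast.length : Int) := by
        rw [List.length_dropLast]
        have : 1 ≤ dims.length := List.length_pos_iff.mpr hne
        omega
      rw [PySem.List.pyGetD_eq_getElem dims (0, 0) hx.1 (by
          have : (dims.dropLast.length : Int) ≤ (dims.length : Int) := by
            simp [List.length_dropLast]
          omega),
        PySem.List.pyGetD_eq_getElem dims.dropLast (0, 0) hx.1 hxlt,
        List.getElem_dropLast]
    rw [hcongr]
    have hlen : ((dims.length : Int) - 1) = PySem.List.len dims.dropLast := by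
      have : 1 ≤ dims.length := List.length_pos_iff.mpr hne
      simp only [PySem.List.len, List.length_dropLast]
      omega
    rw [hlen, PySem.List.foldl_pyRange_zero_pyGetD dims.dropLast ((0 : Int), (0 : Int))
      (fun qn t => qn ++ [PySem.List.pyGetD qn (-1) 0 + t.2]) [1],
      show ([1] : List Int) = [] ++ [1] from rfl, tg_A_qn]
    simp only [List.nil_append, List.singleton_append]
    rw [tg_qsums_map]
    -- now rewrite B's side to the same closed form
    have hn1 : (dims.dropLast.map Prod.snd).length + 1 = dims.length := by
      have : 1 ≤ dims.length := List.length_pos_iff.mpr hne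
      simp [List.length_dropLast]
      omega
    rw [hn1]
    have hlen2 : PySem.List.len dims = (dims.length : Int) := by simp [PySem.List.len]
    rw [hlen2, PySem.List.pyRange_zero_natCast, List.map_map]
    refine (List.map_congr_left (fun k hk => ?_)).symm
    rw [List.mem_range] at hk
    have hk1 : k ≤ dims.length - 1 := by omega
    simp only [Function.comp_apply, PySem.List.slice_to_natCast, List.map_take]
    refine congrArg _ (congrArg _ ?_)
    rw [List.dropLast_eq_take, List.map_take, List.take_take]
    congr 1
    simp
    omega
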